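-- pv_equiv track=rewrite | github.com/naixsu/Advent-of-Code | 2025/day_3/part_1.py | largest_two_digit_subnumber
-- ===== SOURCE A (Python) =====
-- def largest_two_digit_subnumber(digits: list[int]) -> int:
--     best = -1
--     n = len(digits)
--
--     for i in range(n - 1):
--         first = digits[i]
--         second = max(digits[i + 1:])
--         best = max(best, first * 10 + second)
--
--     return best
-- ===== SOURCE B (Python) =====
-- def largest_two_digit_subnumber(digits: list[int]) -> int:
--     # One backward pass: keep the running maximum of the elements already
--     # seen (the suffix) and combine each earlier digit with it.
--     best = -1
--     suffix_max = None
--     for d in reversed(digits):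
--         if suffix_max is not None:
--             best = max(best, d * 10 + suffix_max)
--             suffix_max = max(suffix_max, d)
--         else:
--             suffix_max = d
--     return best
-- ===== Notes on version B (the rewrite author's own statement) =====
-- stated objective: faster
-- what changed: Replaces the quadratic loop that recomputes max(digits[i+1:]) for every i with a single backward pass that maintains a running suffix maximum.
import Mathlib
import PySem

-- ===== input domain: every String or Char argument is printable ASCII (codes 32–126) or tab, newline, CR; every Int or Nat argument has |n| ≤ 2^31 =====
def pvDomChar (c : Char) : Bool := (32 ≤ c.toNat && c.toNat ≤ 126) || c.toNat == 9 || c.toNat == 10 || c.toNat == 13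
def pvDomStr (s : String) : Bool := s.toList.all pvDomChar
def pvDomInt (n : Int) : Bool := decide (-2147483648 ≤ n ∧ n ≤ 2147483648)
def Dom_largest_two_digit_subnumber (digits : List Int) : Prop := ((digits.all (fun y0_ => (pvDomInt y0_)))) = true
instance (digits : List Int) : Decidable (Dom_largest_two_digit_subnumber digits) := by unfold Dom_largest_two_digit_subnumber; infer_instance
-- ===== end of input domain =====

-- B replaces A's quadratic recomputation of max(digits[i+1:]) with a single backward pass
-- carrying a running suffix maximum (objective: faster, asymptotic O(n^2) → O(n)).


-- ===== PORT A =====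
-- 'max(digits[i+1:])': the slice is nonempty for every i in range(n-1), so Python's max
-- never raises here; the .getD 0 default is unreachable.
def largest_two_digit_subnumber (digits : List Int) : Int :=
  let n : Int := digits.length
  (PySem.List.pyRange 0 (n - 1) 1).foldl
    (fun best i =>
      let first := PySem.List.pyGetD digits i 0
      let second := (PySem.List.max? (PySem.List.slice digits (some (i + 1)) none) (fun y => y)).getD 0
      max best (first * 10 + second))
    (-1)

-- ===== PORT B =====
def largest_two_digit_subnumber_alt (digits : List Int) : Int :=
  (digits.reverse.foldl
    (fun (st : Int × Option Int) (d : Int) =>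
      match st with
      | (best, some m) => (max best (d * 10 + m), some (max m d))
      | (best, none)   => (best, some d))
    ((-1 : Int), (none : Option Int))).1

-- ===== PRECONDITION & SPEC =====
def Spec_largest_two_digit_subnumber (digits : List Int) (out : Int) : Prop := out = largest_two_digit_subnumber_alt digits
instance (digits : List Int) (out : Int) : Decidable (Spec_largest_two_digit_subnumber digits out) := by unfold Spec_largest_two_digit_subnumber; infer_instance

-- ===== CLAIM (what is proved, stated in full; the proofs are below) =====
def Claim_equal_largest_two_digit_subnumber : Prop := ∀ (digits : List Int), Dom_largest_two_digit_subnumber digits → Spec_largest_two_digit_subnumber digits (largest_two_digit_subnumber digits)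

-- ===== LEMMAS AND PROOFS =====

-- max of a nonempty list, none for []
def pvSufmax : List Int → Option Int
  | [] => none
  | x :: t => some (t.foldl max x)

-- reference value: max over i of digits[i]*10 + max(digits[i+1:]), floored at -1
def pvGspec : List Int → Int
  | [] => -1
  | x :: t =>
    match pvSufmax t with
    | none => -1
    | some m => max (pvGspec t) (x * 10 + m)

theorem pvNegOneLe_gspec (l : List Int) : -1 ≤ pvGspec l := by
  induction l with
  | nil => simp [pvGspec]
  | cons x t ih =>
    cases t with
    | nil => simp [pvGspec, pvSufmax]
    | cons y tt =>
      simp only [pvGspec, pvSufmax]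
      exact le_trans ih (le_max_left _ _)

theorem pvFoldlMaxComm (t : List Int) : ∀ a b : Int, t.foldl max (max a b) = max (t.foldl max a) b := by
  induction t with
  | nil => intro a b; simp
  | cons x t ih =>
    intro a b
    simp only [List.foldl_cons]
    rw [show max (max a b) x = max (max a x) b by
      simp [max_comm, max_left_comm], ih]

-- B's fold over the reversed list computes (pvGspec l, pvSufmax l)
theorem pvBchar (l : List Int) :
    l.reverse.foldl
      (fun (st : Int × Option Int) (d : Int) =>
        match st with
        | (best, some m) => (max best (d * 10 + m), some (max m d))
        | (best, none)   => (best, some d))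
      ((-1 : Int), (none : Option Int)) = (pvGspec l, pvSufmax l) := by
  induction l with
  | nil => simp [pvGspec, pvSufmax]
  | cons x t ih =>
    rw [List.reverse_cons, List.foldl_append, ih]
    cases t with
    | nil => simp [pvGspec, pvSufmax]
    | cons y tt =>
      simp only [pvGspec, pvSufmax, List.foldl_cons]
      have h : tt.foldl max (max x y) = max (tt.foldl max y) x := by
        rw [show max x y = max y x from max_comm x y, pvFoldlMaxComm]
      simp [h, max_comm]

-- shifting A's inner loop from (x :: t) at indices 1.. to t at indices 0..
theorem pvShift (x : Int) (t : List Int) (b : Int) :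
    (PySem.List.pyRange 1 ((t.length : Int)) 1).foldl
      (fun best i =>
        max best (PySem.List.pyGetD (x :: t) i 0 * 10 +
          (PySem.List.max? (PySem.List.slice (x :: t) (some (i + 1)) none) (fun y => y)).getD 0)) b
    =
    (PySem.List.pyRange 0 ((t.length : Int) - 1) 1).foldl
      (fun best i =>
        max best (PySem.List.pyGetD t i 0 * 10 +
          (PySem.List.max? (PySem.List.slice t (some (i + 1)) none) (fun y => y)).getD 0)) b := by
  rw [PySem.List.pyRange_one 1, PySem.List.pyRange_one 0, List.foldl_map, List.foldl_map]
  rw [show ((t.length : Int) - 1 - 0).toNat = ((t.length : Int) - 1).toNat by norm_num]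
  apply PySem.List.foldl_congr_mem
  intro acc k _
  have h1 : PySem.List.pyGetD (x :: t) (1 + (k : Int)) 0 = PySem.List.pyGetD t ((0 : Int) + (k : Int)) 0 := by
    rw [show (1 : Int) + (k : Int) = ((k + 1 : Nat) : Int) by push_cast; ring,
      show (0 : Int) + (k : Int) = ((k : Nat) : Int) by simp,
      PySem.List.pyGetD_natCast, PySem.List.pyGetD_natCast]
    simp
  have h2 : PySem.List.slice (x :: t) (some (1 + (k : Int) + 1)) none
      = PySem.List.slice t (some ((0 : Int) + (k : Int) + 1)) none := by
    rw [show (1 : Int) + (k : Int) + 1 = ((k + 2 : Nat) : Int) by push_cast; ring,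
      show (0 : Int) + (k : Int) + 1 = ((k + 1 : Nat) : Int) by push_cast; ring,
      PySem.List.slice_from_natCast, PySem.List.slice_from_natCast]
    simp
  rw [h1, h2]

-- generalized characterization of A's fold
theorem pvAchar (l : List Int) : ∀ b : Int, -1 ≤ b →
    (PySem.List.pyRange 0 ((l.length : Int) - 1) 1).foldl
      (fun best i =>
        max best (PySem.List.pyGetD l i 0 * 10 +
          (PySem.List.max? (PySem.List.slice l (some (i + 1)) none) (fun y => y)).getD 0)) b
    = max b (pvGspec l) := by
  induction l with
  | nil =>
    intro b hb
    rw [PySem.List.pyRange_one_eq_nil (by norm_num)]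
    simp only [List.foldl_nil, pvGspec]
    omega
  | cons x t ih =>
    intro b hb
    cases t with
    | nil =>
      rw [show ((([x] : List Int).length : Int) - 1) = 0 by simp,
        PySem.List.pyRange_one_eq_nil (by norm_num)]
      simp only [List.foldl_nil, pvGspec, pvSufmax]
      omega
    | cons y tt =>
      have hlen : (((x :: y :: tt : List Int).length : Int) - 1) = ((y :: tt : List Int).length : Int) := by
        simp
      have hpos : (0 : Int) < ((y :: tt : List Int).length : Int) := by
        exact_mod_cast Nat.succ_pos tt.length
      rw [hlen, PySem.List.pyRange_one_cons hpos, List.foldl_cons]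
      have hget0 : PySem.List.pyGetD (x :: y :: tt) (0 : Int) 0 = x := by
        rw [show (0 : Int) = ((0 : Nat) : Int) by simp, PySem.List.pyGetD_natCast]
        simp
      have hslice0 : PySem.List.slice (x :: y :: tt) (some (1 : Int)) none = y :: tt := by
        rw [show (1 : Int) = ((1 : Nat) : Int) by simp, PySem.List.slice_from_natCast]
        simp
      have hmax0 : (PySem.List.max? (y :: tt) (fun y => y)).getD 0 = tt.foldl max y := by
        rw [PySem.List.max?_id_cons]; rfl
      simp only [hget0, hslice0, hmax0, zero_add]
      rw [pvShift x (y :: tt) _, ih _ (le_trans hb (le_max_left _ _))]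
      simp only [pvGspec, pvSufmax]
      rw [max_assoc, max_comm (x * 10 + tt.foldl max y) _]

-- ===== VERDICT (by name: the statement is the Claim_ definition above) =====
theorem largest_two_digit_subnumber_spec : Claim_equal_largest_two_digit_subnumber := by
  intro digits _
  unfold Spec_largest_two_digit_subnumber
  have hB : largest_two_digit_subnumber_alt digits = pvGspec digits := by
    unfold largest_two_digit_subnumber_alt
    rw [pvBchar]
  have hA : largest_two_digit_subnumber digits = max (-1) (pvGspec digits) :=
    pvAchar digits (-1) le_rfl
  rw [hA, hB]
  exact max_eq_right (pvNegOneLe_gspec digits)
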